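-- pv_equiv track=rewrite | github.com/harvy1070/harvy_project | lv1/Make_Keypad.py | solution
-- ===== SOURCE A (Python) =====
-- def solution(keymap, targets):
--     answer = []
--     dic = {}
--
--     for i in keymap:
--         tmp = list(set(list(i)))
--         for j in tmp:
--             if j in dic:
--                 dic[j] = min(dic[j], i.index(j)+1)
--             else:
--                 dic[j] = i.index(j) + 1
--
--     for i in targets:
--         tmp = 0
--         for j in i:
--             if j in dic:
--                 tmp += dic[j]
--             else:
--                 tmp += 1
--                 break
--         answer.append(tmp)
--
--     return answer
-- ===== SOURCE B (Python) =====
-- def solution(keymap, targets):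
--     # Alternative decomposition: no precomputed dict; per character scan every
--     # keymap on demand with str.find and keep the minimal press count.
--     def press(t):
--         s = 0
--         for ch in t:
--             b = None
--             for km in keymap:
--                 f = km.find(ch)
--                 if f >= 0:
--                     c = f + 1
--                     if b is None or c < b:
--                         b = c
--             if b is None:
--                 return s + 1
--             s += b
--         return s
--     return [press(t) for t in targets]
-- ===== Notes on version B (the rewrite author's own statement) =====
-- stated objective: alternative
-- what changed: Replaces A's dedup-set + dict index precomputation with on-demand scanning: for each target character B scans every keymap with str.find and keeps the minimal index+1, returning the partial sum + 1 as soon as a character is on no keymap.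
import Mathlib
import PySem

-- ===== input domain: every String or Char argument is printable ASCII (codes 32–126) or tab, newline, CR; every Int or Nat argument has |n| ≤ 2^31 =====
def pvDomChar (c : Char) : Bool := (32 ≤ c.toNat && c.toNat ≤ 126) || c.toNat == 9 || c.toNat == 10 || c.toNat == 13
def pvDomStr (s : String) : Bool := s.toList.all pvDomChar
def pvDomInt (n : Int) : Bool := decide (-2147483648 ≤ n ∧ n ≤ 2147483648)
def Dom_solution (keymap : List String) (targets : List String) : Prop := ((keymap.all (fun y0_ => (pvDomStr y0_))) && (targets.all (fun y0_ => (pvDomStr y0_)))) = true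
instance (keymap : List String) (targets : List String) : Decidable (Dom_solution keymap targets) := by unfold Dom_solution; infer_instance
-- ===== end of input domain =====

-- B drops A's dict precomputation and instead scans every keymap per target character; same values, alternative algorithm.

-- ===== PORT A =====
-- dic[j] = min(dic[j], i.index(j)+1) / dic[j] = i.index(j)+1   (j always occurs in i, so getD 0 is never the default)
def solA_entry (i : List Char) (dic : PySem.Dict Char Int) (j : Char) : PySem.Dict Char Int :=
  match dic.get? j with
  | some v => dic.insert j (min v (((PySem.List.index? i j).getD 0 : Int) + 1))
  | none => dic.insert j (((PySem.List.index? i j).getD 0 : Int) + 1)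

-- for i in keymap: for j in set(list(i)): …   (dic is only looked up afterwards, so set order does not matter)
def solA_build (keymap : List String) : PySem.Dict Char Int :=
  keymap.foldl (fun dic i => (PySem.Set.ofList i.toList).foldl (solA_entry i.toList) dic) PySem.Dict.empty

-- inner target loop with its break
def solA_sum (dic : PySem.Dict Char Int) : List Char → Int → Int
  | [], tmp => tmp
  | j :: rest, tmp =>
    match dic.get? j with
    | some v => solA_sum dic rest (tmp + v)
    | none => tmp + 1

def solution (keymap : List String) (targets : List String) : List Int :=
  let dic := solA_build keymap
  targets.foldl (fun answer i => answer ++ [solA_sum dic i.toList 0]) []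

-- ===== PORT B =====
-- body of B's innermost 'for km in keymap' loop
def solBstep (ch : Char) (b : Option Int) (km : String) : Option Int :=
  let f := PySem.Str.find km (String.singleton ch)
  if 0 ≤ f then
    let c := f + 1
    match b with
    | none => some c
    | some bv => if c < bv then some c else some bv
  else b

def solB_best (keymap : List String) (ch : Char) : Option Int :=
  keymap.foldl (solBstep ch) none

-- B's press(t): early return replaces the break
def solB_press (keymap : List String) : List Char → Int → Int
  | [], s => s
  | ch :: rest, s =>
    match solB_best keymap ch with
    | none => s + 1
    | some b => solB_press keymap rest (s + b)

def solution_alt (keymap : List String) (targets : List String) : List Int :=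
  targets.map (fun t => solB_press keymap t.toList 0)

-- ===== PRECONDITION & SPEC =====
def Spec_solution (keymap : List String) (targets : List String) (out : List Int) : Prop := out = solution_alt keymap targets
instance (keymap : List String) (targets : List String) (out : List Int) : Decidable (Spec_solution keymap targets out) := by unfold Spec_solution; infer_instance

-- ===== CLAIM (what is proved, stated in full; the proofs are below) =====
def Claim_equal_solution : Prop := ∀ (keymap : List String) (targets : List String), Dom_solution keymap targets → Spec_solution keymap targets (solution keymap targets)

-- ===== LEMMAS AND PROOFS =====

-- str.find with a single-character needle is exactly the first index (or -1)
lemma find_go_singleton (ch : Char) (xs : List Char) (k : Nat) :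
    PySem.Chars.find.go [ch] xs k =
      match PySem.List.index? xs ch with
      | some j => ((k + j : Nat) : Int)
      | none => -1 := by
  induction xs generalizing k with
  | nil => simp [PySem.Chars.find.go]
  | cons h t ih =>
    by_cases hch : h = ch
    · subst hch
      rw [PySem.List.index?_cons_self]
      simp [PySem.Chars.find.go, List.isPrefixOf]
    · have hpre : List.isPrefixOf [ch] (h :: t) = false := by
        simp [List.isPrefixOf]
        exact fun e => absurd e.symm hch
      rw [PySem.List.index?_cons_of_ne t hch]
      have hgo : PySem.Chars.find.go [ch] (h :: t) k = PySem.Chars.find.go [ch] t (k + 1) := by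
        conv_lhs => rw [PySem.Chars.find.go]
        rw [hpre]
        simp
      rw [hgo, ih (k + 1)]
      cases hi : PySem.List.index? t ch with
      | none => simp
      | some j =>
        simp only [Option.map_some]
        push_cast
        ring_nf

lemma find_singleton (xs : List Char) (ch : Char) :
    PySem.Chars.find xs [ch] =
      match PySem.List.index? xs ch with
      | some j => (j : Int)
      | none => -1 := by
  rw [PySem.Chars.find, find_go_singleton]
  cases PySem.List.index? xs ch <;> simp

-- value A's dict combines in at key j for a keymap whose first index of j is v-1
def combA (o : Option Int) (v : Int) : Int :=
  match o with
  | none => v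
  | some w => min w v

-- effect of the inner set-fold of A on one lookup key
lemma entry_fold_get? (i : List Char) (l : List Char) (dic : PySem.Dict Char Int)
    (ch : Char) (hl : l.Nodup) :
    (l.foldl (solA_entry i) dic).get? ch =
      if ch ∈ l then
        some (combA (dic.get? ch) (((PySem.List.index? i ch).getD 0 : Int) + 1))
      else dic.get? ch := by
  induction l generalizing dic with
  | nil => simp
  | cons j t ih =>
    rcases List.nodup_cons.mp hl with ⟨hj, ht⟩
    have hstep : ∀ d : PySem.Dict Char Int,
        (solA_entry i d j).get? ch =
          if ch = j then some (combA (d.get? ch) (((PySem.List.index? i j).getD 0 : Int) + 1))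
          else d.get? ch := by
      intro d
      unfold solA_entry
      rcases eq_or_ne ch j with hc | hc
      · subst hc
        cases hd : d.get? ch <;> simp [PySem.Dict.get?_insert_self, combA]
      · rw [if_neg hc]
        cases d.get? j <;> simp [PySem.Dict.get?_insert_of_ne _ _ hc]
    rw [List.foldl_cons, ih _ ht]
    rcases eq_or_ne ch j with hc | hc
    · subst hc
      rw [if_neg hj, hstep dic, if_pos rfl, if_pos (List.mem_cons_self)]
    · have h2 : (solA_entry i dic j).get? ch = dic.get? ch := by
        rw [hstep dic, if_neg hc]
      simp [h2, List.mem_cons, hc]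

-- one keymap string of A's build loop acts on a lookup exactly like one step of B's scan
lemma processOne_get? (i : String) (dic : PySem.Dict Char Int) (ch : Char) :
    ((PySem.Set.ofList i.toList).foldl (solA_entry i.toList) dic).get? ch =
      solBstep ch (dic.get? ch) i := by
  rw [entry_fold_get? _ _ _ _ (PySem.Set.nodup_ofList _)]
  have hfind : PySem.Str.find i (String.singleton ch) = PySem.Chars.find i.toList [ch] := by
    simp [PySem.Str.find]
  by_cases hm : ch ∈ i.toList
  · rw [if_pos ((PySem.Set.mem_ofList i.toList ch).mpr hm)]
    cases hidx : PySem.List.index? i.toList ch with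
    | none => exact absurd ((PySem.List.index?_eq_none_iff _ _).mp hidx) (by simpa using hm)
    | some j =>
      unfold solBstep
      rw [hfind, find_singleton, hidx]
      simp only [Option.getD_some]
      rw [if_pos (by positivity)]
      cases hd : dic.get? ch with
      | none => simp [combA]
      | some w =>
        simp only [combA]
        have hmin : min w ((j : Int) + 1) = if (j : Int) + 1 < w then (j : Int) + 1 else w := by
          rw [min_def]
          split_ifs <;> omega
        rw [hmin]
        split_ifs <;> rfl
  · rw [if_neg (fun h => hm ((PySem.Set.mem_ofList i.toList ch).mp h))]
    unfold solBstep
    rw [hfind, find_singleton, (PySem.List.index?_eq_none_iff _ _).mpr hm]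
    norm_num

lemma build_get? (keymap : List String) (dic : PySem.Dict Char Int) (ch : Char) :
    (keymap.foldl (fun d i => (PySem.Set.ofList i.toList).foldl (solA_entry i.toList) d) dic).get? ch =
      keymap.foldl (solBstep ch) (dic.get? ch) := by
  induction keymap generalizing dic with
  | nil => rfl
  | cons i t ih => rw [List.foldl_cons, ih, processOne_get? i dic ch, List.foldl_cons]

lemma dic_eq_best (keymap : List String) (ch : Char) :
    (solA_build keymap).get? ch = solB_best keymap ch := by
  rw [solA_build, build_get?]; rfl

lemma sum_eq_press (keymap : List String) (cs : List Char) (tmp : Int) :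
    solA_sum (solA_build keymap) cs tmp = solB_press keymap cs tmp := by
  induction cs generalizing tmp with
  | nil => rfl
  | cons ch rest ih =>
    rw [solA_sum, solB_press, dic_eq_best]
    cases solB_best keymap ch with
    | none => rfl
    | some v => exact ih _

-- ===== VERDICT (by name: the statement is the Claim_ definition above) =====
theorem solution_spec : Claim_equal_solution := by
  intro keymap targets _
  unfold Spec_solution solution solution_alt
  rw [PySem.List.foldl_append_singleton_eq_map, List.nil_append]
  exact List.map_congr_left (fun t _ => sum_eq_press keymap t.toList 0)
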